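-- pv_equiv track=rewrite | github.com/joaquim-de-melo-neto/python | qtd_letras.py | cont_letras
-- ===== SOURCE A (Python) =====
-- def cont_letras(frase:str):
--     spaces = 0
--     letras = 0
--     pont = 0
--     for letra in frase:
--         if letra.isspace():
--             spaces += 1
--         elif letra.lower().isalpha():
--             letras += 1
--         else:
--             pont += 1
--
--     list = [letras, spaces, pont]
--     return list
-- ===== SOURCE B (Python) =====
-- def cont_letras(frase: str):
--     spaces = sum(1 for c in frase if c.isspace())
--     letras = sum(1 for c in frase if c.lower().isalpha())
--     return [letras, spaces, len(frase) - spaces - letras]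
-- ===== Notes on version B (the rewrite author's own statement) =====
-- stated objective: alternative
-- what changed: Replaces the single mutually-exclusive if/elif/else counting pass with independent per-category aggregations (sum over a predicate for spaces and letters) and derives the punctuation count arithmetically as len(frase) - spaces - letras instead of counting it.
import Mathlib
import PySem

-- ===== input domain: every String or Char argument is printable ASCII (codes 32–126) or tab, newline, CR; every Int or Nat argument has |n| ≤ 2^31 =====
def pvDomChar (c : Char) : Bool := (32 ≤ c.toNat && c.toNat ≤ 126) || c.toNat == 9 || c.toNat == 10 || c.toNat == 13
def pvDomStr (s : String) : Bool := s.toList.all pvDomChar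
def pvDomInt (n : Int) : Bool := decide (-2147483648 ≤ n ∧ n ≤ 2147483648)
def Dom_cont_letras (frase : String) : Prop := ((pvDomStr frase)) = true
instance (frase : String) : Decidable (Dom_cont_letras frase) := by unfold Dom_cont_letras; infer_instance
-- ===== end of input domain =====

-- B replaces A's single if/elif/else pass by independent per-category counts, deriving the
-- punctuation bucket arithmetically as len - spaces - letras (alternative decomposition, same cost).


-- ===== PORT A =====
-- one pass; state (spaces, letras, pont), branches in A's order
def contLetrasStep (st : Int × Int × Int) (letra : Char) : Int × Int × Int :=
  if PySem.Chars.isspace letra then (st.1 + 1, st.2.1, st.2.2)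
  else if PySem.Chars.isalpha (PySem.Chars.lowerChar letra) then (st.1, st.2.1 + 1, st.2.2)
  else (st.1, st.2.1, st.2.2 + 1)

def cont_letras (frase : String) : List Int :=
  let r := frase.toList.foldl contLetrasStep (0, 0, 0)
  [r.2.1, r.1, r.2.2]

-- ===== PORT B =====
def cont_letras_alt (frase : String) : List Int :=
  let spaces : Int := (frase.toList.countP PySem.Chars.isspace : Int)
  let letras : Int := (frase.toList.countP (fun c => PySem.Chars.isalpha (PySem.Chars.lowerChar c)) : Int)
  [letras, spaces, PySem.Str.len frase - spaces - letras]

-- ===== PRECONDITION & SPEC =====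
def Spec_cont_letras (frase : String) (out : List Int) : Prop := out = cont_letras_alt frase
instance (frase : String) (out : List Int) : Decidable (Spec_cont_letras frase out) := by unfold Spec_cont_letras; infer_instance

-- ===== CLAIM (what is proved, stated in full; the proofs are below) =====
def Claim_equal_cont_letras : Prop := ∀ (frase : String), Dom_cont_letras frase → Spec_cont_letras frase (cont_letras frase)

-- ===== LEMMAS AND PROOFS =====

-- no char is both a Python space and (after .lower()) alphabetic
lemma char_le_toNat (a b : Char) : (a ≤ b) ↔ a.toNat ≤ b.toNat := by
  rw [Char.le_def, UInt32.le_iff_toNat_le]; rfl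

lemma space_not_alpha (c : Char) (h : PySem.Chars.isspace c = true) :
    PySem.Chars.isalpha (PySem.Chars.lowerChar c) = false := by
  simp only [PySem.Chars.isspace, Bool.or_eq_true, Bool.and_eq_true, decide_eq_true_eq] at h
  unfold PySem.Chars.lowerChar
  split_ifs with hu
  · exfalso
    simp only [PySem.Chars.isupper, Bool.and_eq_true, decide_eq_true_eq, char_le_toNat] at hu
    have hA : ('A').toNat = 65 := rfl
    have hZ : ('Z').toNat = 90 := rfl
    omega
  · simp only [PySem.Chars.isalpha, PySem.Chars.isupper, PySem.Chars.islower, char_le_toNat,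
      Bool.or_eq_false_iff, Bool.and_eq_false_iff, decide_eq_false_iff_not]
    have hA : ('A').toNat = 65 := rfl
    have hZ : ('Z').toNat = 90 := rfl
    have ha : ('a').toNat = 97 := rfl
    have hz : ('z').toNat = 122 := rfl
    omega

lemma fold_inv (cs : List Char) : ∀ (s l p : Int),
    cs.foldl contLetrasStep (s, l, p) =
      (s + (cs.countP PySem.Chars.isspace : Int),
       l + (cs.countP (fun c => PySem.Chars.isalpha (PySem.Chars.lowerChar c)) : Int),
       p + ((cs.length : Int) - (cs.countP PySem.Chars.isspace : Int)
            - (cs.countP (fun c => PySem.Chars.isalpha (PySem.Chars.lowerChar c)) : Int))) := by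
  induction cs with
  | nil => intro s l p; simp
  | cons c cs ih =>
    intro s l p
    by_cases hs : PySem.Chars.isspace c = true
    · have ha := space_not_alpha c hs
      simp [contLetrasStep, hs, ha, ih]
      all_goals omega
    · by_cases ha : PySem.Chars.isalpha (PySem.Chars.lowerChar c) = true
      · simp [contLetrasStep, hs, ha, ih]
        all_goals omega
      · simp [contLetrasStep, hs, ha, ih]
        all_goals omega

-- ===== VERDICT (by name: the statement is the Claim_ definition above) =====
theorem cont_letras_spec : Claim_equal_cont_letras := by
  intro frase _
  unfold Spec_cont_letras cont_letras cont_letras_alt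
  simp [fold_inv, PySem.Str.len]
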